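-- pv_equiv track=rewrite | github.com/littlekeith/make_your_robot_rest_api | Day7/src/run.py | order_suite_setup_and_teardown
-- ===== SOURCE A (Python) =====
-- def get_setup_or_teardown_numbers(suite_steps, kw_type='setup'):
--
--     numbers = [index for index, item in enumerate(
--         suite_steps) if item.get('type') == kw_type]
--     if len(numbers) >= 2:
--         raise Exception(
--             "At least two {} were found in config steps: {}".format(kw_type, suite_steps))
--
-- def order_suite_setup_and_teardown(suite_steps):
--     '''
--     If find teardown and setup in steps,
--     then make sure create setup keyword first
--     '''
--     get_setup_or_teardown_numbers(suite_steps)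
--     get_setup_or_teardown_numbers(suite_steps, 'teardown')
-- #
--     b_teardown = False
--     index_td = 0
--     import copy
--     cp_steps = copy.deepcopy(suite_steps)
--     for index, step in enumerate(suite_steps):
--
--         kw_type = step.get('type')
--         if kw_type == 'teardown':
--             b_teardown = True
--             index_td = index
--         if kw_type == 'setup':
--             if b_teardown and index > index_td:
--                 cp_steps[index_td], cp_steps[index] = cp_steps[index], cp_steps[index_td]
--
--     return cp_steps
-- ===== SOURCE B (Python) =====
-- import copy
--
--
-- def order_suite_setup_and_teardown(suite_steps):
--     '''
--     If find teardown and setup in steps,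
--     then make sure create setup keyword first
--     '''
--     for kw_type in ('setup', 'teardown'):
--         if sum(1 for item in suite_steps if item.get('type') == kw_type) >= 2:
--             raise Exception(
--                 "At least two {} were found in config steps: {}".format(kw_type, suite_steps))
--
--     cp_steps = copy.deepcopy(suite_steps)
--     setup_idx = next((i for i, item in enumerate(suite_steps)
--                       if item.get('type') == 'setup'), None)
--     teardown_idx = next((i for i, item in enumerate(suite_steps)
--                          if item.get('type') == 'teardown'), None)
--     if setup_idx is not None and teardown_idx is not None and teardown_idx < setup_idx:
--         cp_steps[teardown_idx], cp_steps[setup_idx] = \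
--             cp_steps[setup_idx], cp_steps[teardown_idx]
--     return cp_steps
-- ===== Notes on version B (the rewrite author's own statement) =====
-- stated objective: simpler
-- what changed: Replaces the stateful single pass (teardown flag + last-teardown index mutated while scanning) with a direct computation: find the unique setup index and teardown index, and swap the two entries once iff the teardown comes first.
import Mathlib
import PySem

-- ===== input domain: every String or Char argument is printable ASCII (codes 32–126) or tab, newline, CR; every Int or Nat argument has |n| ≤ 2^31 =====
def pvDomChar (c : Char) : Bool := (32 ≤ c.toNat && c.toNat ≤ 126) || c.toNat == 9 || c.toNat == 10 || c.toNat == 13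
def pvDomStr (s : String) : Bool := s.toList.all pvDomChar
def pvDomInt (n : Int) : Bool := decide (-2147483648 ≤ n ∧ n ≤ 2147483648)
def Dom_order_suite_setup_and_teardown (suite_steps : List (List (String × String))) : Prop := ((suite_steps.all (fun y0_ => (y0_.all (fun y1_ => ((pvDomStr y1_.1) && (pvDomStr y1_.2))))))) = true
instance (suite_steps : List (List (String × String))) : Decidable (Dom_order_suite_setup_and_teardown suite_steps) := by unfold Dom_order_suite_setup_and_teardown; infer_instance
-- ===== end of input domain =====

-- B replaces A's stateful scan (teardown flag + mutated last-teardown index) by finding the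
-- unique setup/teardown indices and doing one conditional swap; objective: simpler.

-- shared small helpers: step.get('type') (first match, per the dict convention) and the
-- Python simultaneous swap cp[i], cp[j] = cp[j], cp[i]
def pvType (st : List (String × String)) : Option String := List.lookup "type" st

def pvSwap (cp : List (List (String × String))) (i j : Nat) : List (List (String × String)) :=
  (cp.set i (cp.getD j [])).set j (cp.getD i [])

-- ===== PORT A =====
-- the for-loop over enumerate(suite_steps): n is the running index, b/itd are
-- b_teardown/index_td, cp is cp_steps
def osst_loop (steps : List (List (String × String))) (n : Nat) (b : Bool) (itd : Nat)
    (cp : List (List (String × String))) : List (List (String × String)) :=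
  match steps with
  | [] => cp
  | step :: rest =>
    let kw := pvType step
    let b' := if kw = some "teardown" then true else b
    let itd' := if kw = some "teardown" then n else itd
    let cp' := if kw = some "setup" then
        (if b' ∧ itd' < n then pvSwap cp itd' n else cp)
      else cp
    osst_loop rest (n + 1) b' itd' cp'

def order_suite_setup_and_teardown (suite_steps : List (List (String × String))) : List (List (String × String)) :=
  -- the two validation calls raise iff ≥ 2 setups / teardowns: excluded by Pre_;
  -- cp_steps = deepcopy = the same value
  osst_loop suite_steps 0 false 0 suite_steps

-- ===== PORT B =====
def order_suite_setup_and_teardown_alt (suite_steps : List (List (String × String))) : List (List (String × String)) :=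
  let s? := suite_steps.findIdx? (fun st => pvType st = some "setup")
  let t? := suite_steps.findIdx? (fun st => pvType st = some "teardown")
  match s?, t? with
  | some s, some t => if t < s then pvSwap suite_steps t s else suite_steps
  | _, _ => suite_steps

-- ===== PRECONDITION & SPEC =====
-- Pre_ excludes exactly the inputs on which A's two validation calls raise:
-- two or more steps with type 'setup', or two or more with type 'teardown'.
def Pre_order_suite_setup_and_teardown (suite_steps : List (List (String × String))) : Prop :=
  suite_steps.countP (fun st => pvType st = some "setup") ≤ 1 ∧
  suite_steps.countP (fun st => pvType st = some "teardown") ≤ 1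
instance (suite_steps : List (List (String × String))) : Decidable (Pre_order_suite_setup_and_teardown suite_steps) := by unfold Pre_order_suite_setup_and_teardown; infer_instance

def pvWitness_order_suite_setup_and_teardown : (List (List (String × String))) :=
  [[("type", "teardown")], [("name", "step1")], [("type", "setup")]]

def Spec_order_suite_setup_and_teardown (suite_steps : List (List (String × String))) (out : List (List (String × String))) : Prop := out = order_suite_setup_and_teardown_alt suite_steps
instance (suite_steps : List (List (String × String))) (out : List (List (String × String))) : Decidable (Spec_order_suite_setup_and_teardown suite_steps out) := by unfold Spec_order_suite_setup_and_teardown; infer_instance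

-- ===== CLAIM (what is proved, stated in full; the proofs are below) =====
def Claim_equal_order_suite_setup_and_teardown : Prop := ∀ (suite_steps : List (List (String × String))), Dom_order_suite_setup_and_teardown suite_steps → Pre_order_suite_setup_and_teardown suite_steps → Spec_order_suite_setup_and_teardown suite_steps (order_suite_setup_and_teardown suite_steps)

-- ===== LEMMAS AND PROOFS =====

-- if no remaining step has type 'setup', the loop never touches cp
lemma osst_loop_no_setup (steps : List (List (String × String))) (n : Nat) (b : Bool)
    (itd : Nat) (cp : List (List (String × String)))
    (h : steps.countP (fun st => pvType st = some "setup") = 0) :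
    osst_loop steps n b itd cp = cp := by
  induction steps generalizing n b itd with
  | nil => rfl
  | cons step rest ih =>
    rw [List.countP_cons] at h
    by_cases hp : pvType step = some "setup"
    · simp [hp] at h
    · simp only [osst_loop, hp, if_false]
      exact ih _ _ _ (by omega)

-- characterisation of A's loop under the ≤1 count hypotheses
lemma osst_loop_char (steps : List (List (String × String))) (n : Nat) (b : Bool)
    (itd : Nat) (cp : List (List (String × String)))
    (hs : steps.countP (fun st => pvType st = some "setup") ≤ 1)
    (ht : steps.countP (fun st => pvType st = some "teardown") ≤ 1) :
    osst_loop steps n b itd cp =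
      match steps.findIdx? (fun st => pvType st = some "setup"),
            steps.findIdx? (fun st => pvType st = some "teardown") with
      | some s, some t =>
          if t < s then pvSwap cp (n + t) (n + s)
          else if b ∧ itd < n + s then pvSwap cp itd (n + s) else cp
      | some s, none => if b ∧ itd < n + s then pvSwap cp itd (n + s) else cp
      | _, _ => cp := by
  induction steps generalizing n b itd cp with
  | nil => rfl
  | cons step rest ih =>
    rw [List.countP_cons] at hs ht
    by_cases hq : pvType step = some "teardown"
    · have hp : ¬ pvType step = some "setup" := by
        rw [hq]; simp
      have hs' : rest.countP (fun st => pvType st = some "setup") ≤ 1 := by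
        rw [if_neg (by simp [hp] : ¬ decide (pvType step = some "setup") = true)] at hs
        omega
      have ht0 : rest.countP (fun st => pvType st = some "teardown") = 0 := by
        rw [if_pos (by simp [hq] : decide (pvType step = some "teardown") = true)] at ht
        omega
      have htn : rest.findIdx? (fun st => pvType st = some "teardown") = none := by
        rw [List.findIdx?_eq_none_iff]
        intro x hx
        have := List.countP_eq_zero.mp ht0 x hx
        simpa using this
      simp only [osst_loop, hp, hq, if_true, if_false]
      rw [ih _ _ _ _ hs' (by omega), htn]
      rw [List.findIdx?_cons, List.findIdx?_cons]
      simp only [hp, hq, decide_true, decide_false, cond_true, cond_false, htn,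
        Option.map_none]
      cases hfs : rest.findIdx? (fun st => pvType st = some "setup") with
      | none => simp
      | some s' =>
        simp only [Option.map_some]
        have h1 : n < n + 1 + s' := by omega
        have h2 : (0 : Nat) < s' + 1 := by omega
        simp only [h1, and_true, if_pos, h2, if_pos]
        have : n + 1 + s' = n + (s' + 1) := by omega
        simp [this]
    · by_cases hp : pvType step = some "setup"
      · have hs0 : rest.countP (fun st => pvType st = some "setup") = 0 := by
          rw [if_pos (by simp [hp] : decide (pvType step = some "setup") = true)] at hs
          omega
        simp only [osst_loop, hp, hq, if_true, if_false]
        rw [osst_loop_no_setup _ _ _ _ _ hs0]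
        rw [List.findIdx?_cons, List.findIdx?_cons]
        simp only [hp, hq, decide_true, decide_false, cond_true, cond_false]
        cases hft : rest.findIdx? (fun st => pvType st = some "teardown") with
        | none => simp
        | some t' =>
          simp only [Option.map_some]
          have : ¬ (t' + 1 < 0) := by omega
          simp [this]
      · simp only [osst_loop, hp, hq, if_false]
        have hs' : rest.countP (fun st => pvType st = some "setup") ≤ 1 := by
          rw [if_neg (by simp [hp] : ¬ decide (pvType step = some "setup") = true)] at hs
          omega
        have ht' : rest.countP (fun st => pvType st = some "teardown") ≤ 1 := by
          rw [if_neg (by simp [hq] : ¬ decide (pvType step = some "teardown") = true)] at ht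
          omega
        rw [ih _ _ _ _ hs' ht']
        rw [List.findIdx?_cons, List.findIdx?_cons]
        simp only [hp, hq, decide_false, cond_false]
        cases hfs : rest.findIdx? (fun st => pvType st = some "setup") with
        | none =>
          cases hft : rest.findIdx? (fun st => pvType st = some "teardown") <;> simp
        | some s' =>
          cases hft : rest.findIdx? (fun st => pvType st = some "teardown") with
          | none =>
            simp only [Option.map_some, Option.map_none]
            have e2 : n + 1 + s' = n + (s' + 1) := by omega
            simp [e2]
          | some t' =>
            simp only [Option.map_some]
            have e1 : n + 1 + t' = n + (t' + 1) := by omega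
            have e2 : n + 1 + s' = n + (s' + 1) := by omega
            by_cases hlt : t' < s'
            · have hlt' : t' + 1 < s' + 1 := by omega
              simp [hlt, hlt', e1, e2]
            · have hlt' : ¬ (t' + 1 < s' + 1) := by omega
              simp [hlt, hlt', e2]

-- ===== VERDICT (by name: the statement is the Claim_ definition above) =====
theorem order_suite_setup_and_teardown_spec : Claim_equal_order_suite_setup_and_teardown := by
  intro ss _ hpre
  obtain ⟨hs, ht⟩ := hpre
  unfold Spec_order_suite_setup_and_teardown order_suite_setup_and_teardown
    order_suite_setup_and_teardown_alt
  rw [osst_loop_char ss 0 false 0 ss hs ht]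
  cases hfs : ss.findIdx? (fun st => pvType st = some "setup") with
  | none => cases hft : ss.findIdx? (fun st => pvType st = some "teardown") <;> simp
  | some s =>
    cases hft : ss.findIdx? (fun st => pvType st = some "teardown") with
    | none => simp
    | some t => simp
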